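-- pv_equiv track=rewrite | github.com/ShingSmile/Obsidian-Knowledge-Steward | backend/app/services/digest.py | _format_note_type_counts
-- ===== SOURCE A (Python) =====
-- from collections import Counter
--
-- def _format_note_type_counts(note_type_counts: Counter[str]) -> str:
--     parts: list[str] = []
--     for note_type in ("daily_note", "summary_note", "generic_note"):
--         count = note_type_counts.get(note_type, 0)
--         if count:
--             parts.append(f"{note_type} {count} 篇")
--     for note_type in sorted(note_type_counts):
--         if note_type in {"daily_note", "summary_note", "generic_note"}:
--             continue
--         parts.append(f"{note_type} {note_type_counts[note_type]} 篇")
--     return "，".join(parts) if parts else "无"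
-- ===== SOURCE B (Python) =====
-- from collections import Counter
--
-- def _format_note_type_counts(note_type_counts: Counter[str]) -> str:
--     priority = {"daily_note": 0, "summary_note": 1, "generic_note": 2}
--     parts = [
--         f"{k} {note_type_counts[k]} 篇"
--         for k in sorted(note_type_counts, key=lambda k: (priority.get(k, 3), k))
--         if priority.get(k, 3) == 3 or note_type_counts[k]
--     ]
--     return "，".join(parts) if parts else "无"
-- ===== Notes on version B (the rewrite author's own statement) =====
-- stated objective: simpler
-- what changed: Replaces A's two separate emission passes (fixed-order loop over the three known types, then a loop over the sorted remaining keys) with a single comprehension over the keys sorted once by the tuple key (priority rank, name), filtering out only zero-count fixed types.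
import Mathlib
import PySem

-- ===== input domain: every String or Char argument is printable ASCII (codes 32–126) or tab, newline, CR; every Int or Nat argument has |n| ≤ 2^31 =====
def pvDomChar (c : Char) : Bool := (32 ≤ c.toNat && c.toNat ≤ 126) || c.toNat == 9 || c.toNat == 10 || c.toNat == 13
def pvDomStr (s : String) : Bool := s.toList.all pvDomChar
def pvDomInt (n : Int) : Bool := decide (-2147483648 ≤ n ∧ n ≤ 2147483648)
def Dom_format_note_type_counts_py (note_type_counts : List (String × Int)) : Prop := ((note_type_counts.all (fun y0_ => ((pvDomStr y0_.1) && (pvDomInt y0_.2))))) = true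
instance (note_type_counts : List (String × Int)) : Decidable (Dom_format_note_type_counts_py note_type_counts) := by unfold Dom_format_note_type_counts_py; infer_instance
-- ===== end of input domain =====

-- B replaces A's two emission passes with one traversal of the keys sorted once by the
-- tuple key (priority rank, name); same output, same asymptotic cost (objective: simpler).

-- ===== PORT A =====
-- the Counter argument arrives as an association list; dict semantics via PySem.Dict.ofList
def format_note_type_counts_py (note_type_counts : List (String × Int)) : String :=
  let d := PySem.Dict.ofList note_type_counts
  let parts : List String :=
    ["daily_note", "summary_note", "generic_note"].foldl (fun parts note_type =>
      let count := d.getD note_type 0       -- note_type_counts.get(note_type, 0)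
      if count ≠ 0 then parts ++ [note_type ++ " " ++ PySem.Int.toStr count ++ " 篇"] else parts) []
  let parts :=
    (PySem.List.sorted d.keys (fun k => k)).foldl (fun parts note_type =>
      if note_type = "daily_note" ∨ note_type = "summary_note" ∨ note_type = "generic_note" then parts
      else parts ++ [note_type ++ " " ++ PySem.Int.toStr (d.getD note_type 0) ++ " 篇"]) parts
      -- d[note_type]: the key is drawn from d's own keys, so getD _ 0 is exact here
  if parts ≠ [] then PySem.Str.join "，" parts else "无"

-- ===== PORT B =====
def format_note_type_counts_py_alt (note_type_counts : List (String × Int)) : String :=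
  let d := PySem.Dict.ofList note_type_counts
  let priority : PySem.Dict String Int :=
    PySem.Dict.ofList [("daily_note", 0), ("summary_note", 1), ("generic_note", 2)]
  let parts : List String :=
    ((PySem.List.sorted2 d.keys (fun k => priority.getD k 3) (fun k => k)).filter
      (fun k => priority.getD k 3 == 3 || d.getD k 0 != 0)).map
      (fun k => k ++ " " ++ PySem.Int.toStr (d.getD k 0) ++ " 篇")
      -- note_type_counts[k]: k comes from d's keys, so getD _ 0 is exact here
  if parts ≠ [] then PySem.Str.join "，" parts else "无"

-- ===== PRECONDITION & SPEC =====
def Spec_format_note_type_counts_py (note_type_counts : List (String × Int)) (out : String) : Prop := out = format_note_type_counts_py_alt note_type_counts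
instance (note_type_counts : List (String × Int)) (out : String) : Decidable (Spec_format_note_type_counts_py note_type_counts out) := by unfold Spec_format_note_type_counts_py; infer_instance

-- ===== CLAIM (what is proved, stated in full; the proofs are below) =====
def Claim_equal_format_note_type_counts_py : Prop := ∀ (note_type_counts : List (String × Int)), Dom_format_note_type_counts_py note_type_counts → Spec_format_note_type_counts_py note_type_counts (format_note_type_counts_py note_type_counts)

-- ===== LEMMAS AND PROOFS =====

-- proof-only abbreviations
def pvRnk (k : String) : Int :=
  (PySem.Dict.ofList [("daily_note", (0:Int)), ("summary_note", 1), ("generic_note", 2)]).getD k 3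

def pvBefore (a b : String) : Bool :=
  decide (pvRnk a < pvRnk b) || (!decide (pvRnk b < pvRnk a) && decide (a < b))

def pvFixed : List String := ["daily_note", "summary_note", "generic_note"]

def pvIsFixed (k : String) : Bool := k == "daily_note" || k == "summary_note" || k == "generic_note"

-- insertBy facts
theorem pv_insertBy_perm {α : Type} (before : α → α → Bool) (x : α) (acc : List α) :
    (PySem.List.insertBy before x acc).Perm (x :: acc) := by
  induction acc with
  | nil => simp [PySem.List.insertBy]
  | cons y t ih =>
    simp only [PySem.List.insertBy]
    split
    · exact List.Perm.refl _
    · exact (ih.cons y).trans (List.Perm.swap x y t)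

theorem pv_insertBy_pairwise {α : Type} (before : α → α → Bool)
    (trans : ∀ a b c, before a b = true → before b c = true → before a c = true)
    (x : α) (acc : List α)
    (htot : ∀ y ∈ acc, before x y = true ∨ before y x = true)
    (hp : acc.Pairwise (fun a b => before a b = true)) :
    (PySem.List.insertBy before x acc).Pairwise (fun a b => before a b = true) := by
  induction acc with
  | nil => simp [PySem.List.insertBy]
  | cons y t ih =>
    rcases List.pairwise_cons.mp hp with ⟨hy, ht⟩
    simp only [PySem.List.insertBy]
    split
    · rename_i hxy
      refine List.pairwise_cons.mpr ⟨?_, hp⟩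
      intro z hz
      rcases List.mem_cons.mp hz with rfl | hz'
      · exact hxy
      · exact trans x y z hxy (hy z hz')
    · rename_i hxy
      have hyx : before y x = true := by
        rcases htot y (by simp) with h | h
        · exact absurd h hxy
        · exact h
      refine List.pairwise_cons.mpr ⟨?_, ih (fun z hz => htot z (by simp [hz])) ht⟩
      intro z hz
      rcases (PySem.List.mem_insertBy before x z t).mp hz with rfl | hz2
      · exact hyx
      · exact hy z hz2

theorem pv_foldl_insertBy_perm {α : Type} (before : α → α → Bool) (xs : List α) :
    ∀ acc, (xs.foldl (fun acc x => PySem.List.insertBy before x acc) acc).Perm (xs ++ acc) := by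
  induction xs with
  | nil => intro acc; simp
  | cons x t ih =>
    intro acc
    refine (ih _).trans ?_
    exact (List.Perm.append_left t (pv_insertBy_perm before x acc)).trans List.perm_middle

theorem pv_foldl_insertBy_pairwise {α : Type} (before : α → α → Bool)
    (total : ∀ a b : α, a ≠ b → before a b = true ∨ before b a = true)
    (trans : ∀ a b c, before a b = true → before b c = true → before a c = true)
    (xs : List α) : ∀ acc, xs.Nodup → acc.Pairwise (fun a b => before a b = true) →
    (∀ a ∈ xs, a ∉ acc) →
    (xs.foldl (fun acc x => PySem.List.insertBy before x acc) acc).Pairwise (fun a b => before a b = true) := by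
  induction xs with
  | nil => intro acc _ hp _; simpa using hp
  | cons x t ih =>
    intro acc hnd hp hdisj
    have hxacc : x ∉ acc := hdisj x (by simp)
    have hp' : (PySem.List.insertBy before x acc).Pairwise (fun a b => before a b = true) :=
      pv_insertBy_pairwise before trans x acc
        (fun y hy => total x y (fun h => hxacc (h ▸ hy))) hp
    refine ih _ (List.nodup_cons.mp hnd).2 hp' ?_
    intro a ha hmem
    rcases (PySem.List.mem_insertBy before x a acc).mp hmem with rfl | hmem
    · exact (List.nodup_cons.mp hnd).1 ha
    · exact hdisj a (by simp [ha]) hmem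

theorem pv_foldl_insertBy_eq {α : Type} (before : α → α → Bool)
    (total : ∀ a b : α, a ≠ b → before a b = true ∨ before b a = true)
    (asym : ∀ a b : α, before a b = true → before b a = false)
    (trans : ∀ a b c, before a b = true → before b c = true → before a c = true)
    (xs ys : List α) (hnd : xs.Nodup) (hperm : ys.Perm xs)
    (hys : ys.Pairwise (fun a b => before a b = true)) :
    xs.foldl (fun acc x => PySem.List.insertBy before x acc) [] = ys := by
  have h1 : (xs.foldl (fun acc x => PySem.List.insertBy before x acc) []).Perm xs := by
    simpa using pv_foldl_insertBy_perm before xs []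
  have h2 := pv_foldl_insertBy_pairwise before total trans xs [] hnd (by simp) (by simp)
  refine List.eq_of_perm_of_sorted ?_ h2 hys (h1.trans hperm.symm)
  intro a b _ _ hab hba
  exact absurd hba (by simp [asym a b hab])

-- order facts for pvBefore
theorem pv_before_total (a b : String) (h : a ≠ b) : pvBefore a b = true ∨ pvBefore b a = true := by
  unfold pvBefore
  rcases lt_trichotomy (pvRnk a) (pvRnk b) with hr | hr | hr
  · left; simp [hr]
  · rcases lt_or_gt_of_ne h with hs | hs
    · left; simp [hr, hs]
    · right; simp [hr.symm, hs]
  · right; simp [hr]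

theorem pv_before_asym (a b : String) (h : pvBefore a b = true) : pvBefore b a = false := by
  unfold pvBefore at *
  rcases Bool.or_eq_true_iff.mp h with h1 | h1
  · simp only [decide_eq_true_iff] at h1
    simp [not_lt.mpr h1.le, h1]
  · rcases Bool.and_eq_true_iff.mp h1 with ⟨h2, h3⟩
    simp only [Bool.not_eq_eq_eq_not, Bool.not_true, decide_eq_false_iff_not, not_lt] at h2
    simp only [decide_eq_true_iff] at h3
    simp [not_lt.mpr h2, not_lt.mpr h3.le]

theorem pv_before_trans (a b c : String) (h1 : pvBefore a b = true) (h2 : pvBefore b c = true) :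
    pvBefore a c = true := by
  unfold pvBefore at *
  simp only [Bool.or_eq_true_iff, Bool.and_eq_true_iff, decide_eq_true_iff,
    Bool.not_eq_eq_eq_not, Bool.not_true, decide_eq_false_iff_not, not_lt] at *
  rcases h1 with h1 | ⟨h1a, h1b⟩ <;> rcases h2 with h2 | ⟨h2a, h2b⟩
  · exact Or.inl (h1.trans h2)
  · exact Or.inl (lt_of_lt_of_le h1 h2a)
  · exact Or.inl (lt_of_le_of_lt h1a h2)
  · exact Or.inr ⟨le_trans h1a h2a, h1b.trans h2b⟩

theorem pv_rnk_of_not_fixed (k : String) (h : pvIsFixed k = false) : pvRnk k = 3 := by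
  unfold pvIsFixed at h
  simp only [Bool.or_eq_false_iff, beq_eq_false_iff_ne, ne_eq] at h
  have e : pvRnk k = ((((PySem.Dict.empty.insert "daily_note" (0:Int)).insert "summary_note" 1).insert
      "generic_note" 2).getD k 3) := rfl
  rw [e]
  simp [PySem.Dict.getD_insert, h.1.1, h.1.2, h.2]

theorem pv_rnk_lt_of_fixed (k : String) (h : k ∈ pvFixed) : pvRnk k < 3 := by
  simp only [pvFixed, List.mem_cons, List.not_mem_nil, or_false] at h
  rcases h with rfl | rfl | rfl <;> decide

theorem pv_isFixed_iff (k : String) : pvIsFixed k = true ↔ k ∈ pvFixed := by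
  simp [pvIsFixed, pvFixed]
  tauto

theorem pv_rnk_eq3_of_rest (keys : List String) (a : String)
    (ha : a ∈ PySem.List.sorted (keys.filter (fun k => !pvIsFixed k)) (fun k => k)) :
    pvRnk a = 3 := by
  have := (PySem.List.mem_sorted _ _ _ _).mp ha
  have := List.of_mem_filter this
  exact pv_rnk_of_not_fixed a (by simpa using this)

-- the decomposition of B's single sorted pass
theorem pv_sorted2_decomp (keys : List String) (hnd : keys.Nodup) :
    keys.foldl (fun acc x => PySem.List.insertBy pvBefore x acc) [] =
      (pvFixed.filter (fun k => decide (k ∈ keys))) ++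
        PySem.List.sorted (keys.filter (fun k => !pvIsFixed k)) (fun k => k) := by
  set fixedP := pvFixed.filter (fun k => decide (k ∈ keys)) with hfp
  set rest := PySem.List.sorted (keys.filter (fun k => !pvIsFixed k)) (fun k => k) with hr
  have hfp_perm : fixedP.Perm (keys.filter pvIsFixed) := by
    rw [List.perm_ext_iff_of_nodup ((by decide : pvFixed.Nodup).filter _) (hnd.filter _)]
    intro a
    simp only [List.mem_filter, decide_eq_true_iff]
    constructor
    · rintro ⟨h1, h2⟩; exact ⟨h2, (pv_isFixed_iff a).mpr h1⟩
    · rintro ⟨h1, h2⟩; exact ⟨(pv_isFixed_iff a).mp h2, h1⟩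
  have hperm : (fixedP ++ rest).Perm keys := by
    refine (List.Perm.append hfp_perm (PySem.List.sorted_perm _ _ _)).trans ?_
    exact List.filter_append_perm _ keys
  have hrest_nodup : rest.Nodup := (PySem.List.sorted_perm _ _ _).nodup_iff.mpr (hnd.filter _)
  have hrest_pw : rest.Pairwise (fun a b => pvBefore a b = true) := by
    have h1 : rest.Pairwise (fun a b : String => a ≤ b) := PySem.List.sorted_pairwise _ _
    refine (h1.and hrest_nodup).imp_of_mem ?_
    intro a b ha hb hab
    have ra := pv_rnk_eq3_of_rest keys a ha
    have rb := pv_rnk_eq3_of_rest keys b hb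
    have : a < b := lt_of_le_of_ne hab.1 hab.2
    simp [pvBefore, ra, rb, this]
  have hfix_pw : fixedP.Pairwise (fun a b => pvBefore a b = true) := by
    exact List.Pairwise.filter _ (by decide)
  have hcross : ∀ a ∈ fixedP, ∀ b ∈ rest, pvBefore a b = true := by
    intro a ha b hb
    have h1 : pvRnk a < 3 := pv_rnk_lt_of_fixed a (List.mem_of_mem_filter ha)
    have h2 : pvRnk b = 3 := pv_rnk_eq3_of_rest keys b hb
    simp [pvBefore, h2 ▸ h1]
  exact pv_foldl_insertBy_eq pvBefore pv_before_total pv_before_asym pv_before_trans keys _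
    hnd hperm (List.pairwise_append.mpr ⟨hfix_pw, hrest_pw, hcross⟩)

-- main theorem body
theorem pv_main (l : List (String × Int)) :
    format_note_type_counts_py l = format_note_type_counts_py_alt l := by
  unfold format_note_type_counts_py format_note_type_counts_py_alt
  dsimp only
  set d := PySem.Dict.ofList l with hd
  set fmt : String → String := fun k => k ++ " " ++ PySem.Int.toStr (d.getD k 0) ++ " 篇" with hfmt
  have hnd : d.keys.Nodup := PySem.Dict.nodup_keys_ofList l
  -- A's first loop
  have hA1 : ["daily_note", "summary_note", "generic_note"].foldl (fun parts note_type =>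
      if d.getD note_type 0 ≠ 0 then parts ++ [fmt note_type] else parts) [] =
      (pvFixed.filter (fun k => decide (d.getD k 0 ≠ 0))).map fmt := by
    rw [PySem.List.foldl_append_ite (fun nt => d.getD nt 0 ≠ 0) fmt]
    rfl
  -- A's second loop
  have hA2 : ∀ acc : List String, (PySem.List.sorted d.keys (fun k => k)).foldl (fun parts note_type =>
      if note_type = "daily_note" ∨ note_type = "summary_note" ∨ note_type = "generic_note" then parts
      else parts ++ [fmt note_type]) acc =
      acc ++ ((PySem.List.sorted d.keys (fun k => k)).filter (fun k => !pvIsFixed k)).map fmt := by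
    intro acc
    rw [PySem.List.foldl_congr_mem _ _ (fun parts nt =>
        if ¬(nt = "daily_note" ∨ nt = "summary_note" ∨ nt = "generic_note") then parts ++ [fmt nt] else parts) _
      (by intro acc' x _; by_cases hq : x = "daily_note" ∨ x = "summary_note" ∨ x = "generic_note" <;> simp [hq])]
    rw [PySem.List.foldl_append_ite _ fmt]
    refine congrArg (acc ++ ·) (congrArg (List.map fmt) (List.filter_congr ?_))
    intro x _
    by_cases h1 : x = "daily_note" <;> by_cases h2 : x = "summary_note" <;>
      by_cases h3 : x = "generic_note" <;> simp [pvIsFixed, h1, h2, h3]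
  -- B's sorted2 pass is the insertBy fold with pvBefore
  have hB0 : PySem.List.sorted2 d.keys
      (fun k => (PySem.Dict.ofList [("daily_note", (0:Int)), ("summary_note", 1), ("generic_note", 2)]).getD k 3)
      (fun k => k) =
      d.keys.foldl (fun acc x => PySem.List.insertBy pvBefore x acc) [] := rfl
  -- the second filter of the sorted keys equals B's sorted rest
  have hS : (PySem.List.sorted d.keys (fun k => k)).filter (fun k => !pvIsFixed k) =
      PySem.List.sorted (d.keys.filter (fun k => !pvIsFixed k)) (fun k => k) := by
    symm
    apply PySem.List.sorted_eq_of_perm_of_pairwise_lt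
    · exact List.Perm.filter _ (PySem.List.sorted_perm _ _ _)
    · have h1 : (PySem.List.sorted d.keys (fun k => k)).Pairwise (fun a b : String => a ≤ b) :=
        PySem.List.sorted_pairwise _ _
      have h2 : (PySem.List.sorted d.keys (fun k => k)).Nodup :=
        (PySem.List.sorted_perm _ _ _).nodup_iff.mpr hnd
      exact ((h1.and h2).filter _).imp fun hab => lt_of_le_of_ne hab.1 hab.2
  -- B's filtered fixed block equals A's first-loop block
  have hF : (pvFixed.filter (fun k => decide (k ∈ d.keys))).filter
        (fun k => (PySem.Dict.ofList [("daily_note", (0:Int)), ("summary_note", 1), ("generic_note", 2)]).getD k 3 == 3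
          || d.getD k 0 != 0) =
      pvFixed.filter (fun k => decide (d.getD k 0 ≠ 0)) := by
    rw [List.filter_filter]
    apply List.filter_congr
    intro x hx
    have hr : pvRnk x < 3 := pv_rnk_lt_of_fixed x hx
    have hr' : ((PySem.Dict.ofList [("daily_note", (0:Int)), ("summary_note", 1), ("generic_note", 2)]).getD x 3 == 3) = false := by
      simpa [pvRnk] using (by omega : ¬ pvRnk x = 3)
    by_cases h0 : d.getD x 0 = 0
    · simp [hr', h0]
    · have hc : d.contains x = true := by
        by_contra hc
        exact h0 (PySem.Dict.getD_of_not_contains d 0 (Bool.not_eq_true _ ▸ (by simpa using hc)))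
      have : x ∈ d.keys := (PySem.Dict.contains_iff_mem_keys d x).mp hc
      simp [hr', h0, this]
  -- rest passes B's filter entirely
  have hR : (PySem.List.sorted (d.keys.filter (fun k => !pvIsFixed k)) (fun k => k)).filter
        (fun k => (PySem.Dict.ofList [("daily_note", (0:Int)), ("summary_note", 1), ("generic_note", 2)]).getD k 3 == 3
          || d.getD k 0 != 0) =
      PySem.List.sorted (d.keys.filter (fun k => !pvIsFixed k)) (fun k => k) := by
    apply List.filter_eq_self.mpr
    intro a ha
    have : pvRnk a = 3 := pv_rnk_eq3_of_rest d.keys a ha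
    simp only [pvRnk] at this
    simp [this]
  rw [hA1, hA2, hB0, pv_sorted2_decomp d.keys hnd, List.filter_append, hF, hS, hR, List.map_append]

-- ===== VERDICT (by name: the statement is the Claim_ definition above) =====
theorem format_note_type_counts_py_spec : Claim_equal_format_note_type_counts_py := by
  intro l _
  exact pv_main l
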